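-- pv_equiv track=rewrite | github.com/lymchgmk/Algorithm-Problem-Solving | Programmers/연습문제/Level 3/아방가르드 타일링/Solution.py | solution
-- ===== SOURCE A (Python) =====
-- def solution(n):
--     dp = [0] * (n+1)
--     dp[1], dp[2], dp[3] = 1, 3, 10
--
--     for i in range(4, n+1):
--         for j in range(1, i):
--             k = i - j
--             dp[i] += dp[j] * dp[k]
--         dp[i] -= i
--
--     return dp[n]
-- ===== SOURCE B (Python) =====
-- def solution(n):
--     # O(n): P-recurrence for c_m = coefficients of (1-x)(1-2*A(x)) = sqrt(1-6x+x^2-4x^3+40x^4-28x^5),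
--     # derived from the algebraic equation A = A^2 - x/(1-x)^2 + 2x+4x^2+7x^3 of the DP's generating
--     # function; a_i is recovered from a_{i-1} - c_i//2.
--     c = [1, -3, -4, -14]  # c_0..c_3
--     a = 10  # a_3
--     for i in range(4, n + 1):
--         m = i - 1
--         rhs = (6 * (2 * m - 1) * c[m]
--                + (4 - 2 * m) * c[m - 1]
--                + 4 * (2 * m - 7) * c[m - 2]
--                + 40 * (10 - 2 * m) * c[m - 3]
--                + (28 * (2 * m - 13) * c[m - 4] if m >= 4 else 0))
--         ci = rhs // (2 * (m + 1))
--         c.append(ci)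
--         a = a - ci // 2
--     return a
-- ===== Notes on version B (the rewrite author's own statement) =====
-- stated objective: faster
-- what changed: B abandons the O(n^2) self-convolution DP entirely: from the algebraic equation A = A^2 - x/(1-x)^2 + 2x+4x^2+7x^3 of the sequence's generating function one gets A = (1 - sqrt(Q)/(1-x))/2 with Q = 1-6x+x^2-4x^3+40x^4-28x^5, and the sqrt's coefficients c_m satisfy the order-5 P-recurrence 2(m+1)c_{m+1} = 6(2m-1)c_m + (4-2m)c_{m-1} + 4(2m-7)c_{m-2} + 40(10-2m)c_{m-3} + 28(2m-13)c_{m-4}; B iterates that linear recurrence once and recovers a_i = a_{i-1} - c_i/2.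
import Mathlib
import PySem

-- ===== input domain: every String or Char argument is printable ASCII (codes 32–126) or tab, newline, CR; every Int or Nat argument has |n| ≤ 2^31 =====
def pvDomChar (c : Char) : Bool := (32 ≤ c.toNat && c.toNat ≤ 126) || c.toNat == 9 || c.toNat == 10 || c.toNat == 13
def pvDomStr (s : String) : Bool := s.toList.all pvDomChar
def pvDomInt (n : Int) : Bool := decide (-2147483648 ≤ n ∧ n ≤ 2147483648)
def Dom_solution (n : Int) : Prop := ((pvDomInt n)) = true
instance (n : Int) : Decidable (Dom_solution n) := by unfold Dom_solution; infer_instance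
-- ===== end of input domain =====

-- B replaces A's O(n^2) self-convolution DP by a single O(n) pass of the order-5 P-recurrence
-- 2(m+1)c_{m+1} = 6(2m-1)c_m + (4-2m)c_{m-1} + 4(2m-7)c_{m-2} + 40(10-2m)c_{m-3} + 28(2m-13)c_{m-4}
-- for the coefficients c of sqrt(1-6x+x^2-4x^3+40x^4-28x^5) = (1-x)(1-2A(x)), where A is the
-- sequence's generating function; a_i is recovered as a_{i-1} - c_i/2.

-- ===== PORT A =====
-- all indices passed to pySetD/pyGetD below are nonnegative, so they are exact Python indexing
def solution (n : Int) : Int :=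
  let dp := List.replicate (n + 1).toNat (0 : Int)
  let dp := PySem.List.pySetD dp 1 1
  let dp := PySem.List.pySetD dp 2 3
  let dp := PySem.List.pySetD dp 3 10
  let dp := (PySem.List.pyRange 4 (n + 1) 1).foldl (fun dp i =>
      let dp := (PySem.List.pyRange 1 i 1).foldl (fun dp j =>
          let k := i - j
          PySem.List.pySetD dp i
            (PySem.List.pyGetD dp i 0 + PySem.List.pyGetD dp j 0 * PySem.List.pyGetD dp k 0)) dp
      PySem.List.pySetD dp i (PySem.List.pyGetD dp i 0 - i)) dp
  PySem.List.pyGetD dp n 0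

-- ===== PORT B =====
def solution_alt (n : Int) : Int :=
  let st : List Int × Int := ([1, -3, -4, -14], 10)
  let st := (PySem.List.pyRange 4 (n + 1) 1).foldl (fun (st : List Int × Int) i =>
      let c := st.1
      let a := st.2
      let m := i - 1
      let rhs := 6 * (2 * m - 1) * PySem.List.pyGetD c m 0
        + (4 - 2 * m) * PySem.List.pyGetD c (m - 1) 0
        + 4 * (2 * m - 7) * PySem.List.pyGetD c (m - 2) 0
        + 40 * (10 - 2 * m) * PySem.List.pyGetD c (m - 3) 0
        + (if 4 ≤ m then 28 * (2 * m - 13) * PySem.List.pyGetD c (m - 4) 0 else 0)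
      let ci := PySem.Int.floordiv rhs (2 * (m + 1))
      (c ++ [ci], a - PySem.Int.floordiv ci 2)) st
  st.2

-- ===== PRECONDITION & SPEC =====
-- A raises IndexError for n < 3: the base-case assignments dp[1], dp[2], dp[3] need len(dp) ≥ 4
def Pre_solution (n : Int) : Prop := 3 ≤ n
instance (n : Int) : Decidable (Pre_solution n) := by unfold Pre_solution; infer_instance
def pvWitness_solution : Int := 7

def Spec_solution (n : Int) (out : Int) : Prop := out = solution_alt n
instance (n : Int) (out : Int) : Decidable (Spec_solution n out) := by unfold Spec_solution; infer_instance

-- ===== CLAIM (what is proved, stated in full; the proofs are below) =====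
def Claim_equal_solution : Prop := ∀ (n : Int), Dom_solution n → Pre_solution n → Spec_solution n (solution n)

-- ===== LEMMAS AND PROOFS =====

-- the sequence computed by A's DP, as a pure function: arow n = [a_0, …, a_n]
def arow : ℕ → List ℤ
  | 0 => [0]
  | n+1 =>
    arow n ++ [if n = 0 then 1 else if n = 1 then 3 else if n = 2 then 10
      else (∑ j ∈ Finset.Ico 1 (n+1), (arow n).getD j 0 * (arow n).getD (n+1-j) 0) - (n+1 : ℤ)]

def aseq (n : ℕ) : ℤ := (arow n).getD n 0

-- coefficients of (1-x)(1-2A(x))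
def cseq : ℕ → ℤ
  | 0 => 1
  | 1 => -3
  | n+2 => -2 * (aseq (n+2) - aseq (n+1))

theorem arow_length (n : ℕ) : (arow n).length = n + 1 := by
  induction n with
  | zero => rfl
  | succ n ih => simp [arow, ih]

theorem aseq_succ_val (n : ℕ) :
    aseq (n+1) = (if n = 0 then (1:ℤ) else if n = 1 then 3 else if n = 2 then 10
      else (∑ j ∈ Finset.Ico 1 (n+1), (arow n).getD j 0 * (arow n).getD (n+1-j) 0) - (n+1 : ℤ)) := by
  show (arow (n+1)).getD (n+1) 0 = _
  rw [arow, List.getD_append_right _ _ _ _ (by rw [arow_length]), arow_length]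
  simp

theorem arow_succ (n : ℕ) : arow (n+1) = arow n ++ [aseq (n+1)] := by
  rw [aseq_succ_val]
  rfl

theorem arow_getD (n m : ℕ) (h : m ≤ n) : (arow n).getD m 0 = aseq m := by
  induction n with
  | zero => interval_cases m; rfl
  | succ n ih =>
    rcases Nat.lt_or_ge m (n+1) with hm | hm
    · rw [arow_succ, List.getD_append _ _ _ m (by rw [arow_length]; omega)]
      exact ih (by omega)
    · have : m = n + 1 := by omega
      subst this
      rw [arow_succ, List.getD_append_right _ _ _ _ (by rw [arow_length]), arow_length]
      simp

theorem aseq_zero : aseq 0 = 0 := rfl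
theorem aseq_one : aseq 1 = 1 := by decide
theorem aseq_two : aseq 2 = 3 := by decide
theorem aseq_three : aseq 3 = 10 := by decide

theorem cseq_zero : cseq 0 = 1 := rfl
theorem cseq_one : cseq 1 = -3 := rfl
theorem cseq_two : cseq 2 = -4 := by decide
theorem cseq_three : cseq 3 = -14 := by decide
theorem cseq_four : cseq 4 = -30 := by decide
theorem cseq_five : cseq 5 = -160 := by decide

theorem aseq_rec (n : ℕ) (hn : 4 ≤ n) :
    aseq n = (∑ j ∈ Finset.Ico 1 n, aseq j * aseq (n - j)) - (n : ℤ) := by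
  obtain ⟨k, rfl⟩ : ∃ k, n = k + 1 := ⟨n - 1, by omega⟩
  rw [aseq_succ_val, if_neg (by omega), if_neg (by omega), if_neg (by omega)]
  push_cast
  congr 1
  refine Finset.sum_congr rfl fun j hj => ?_
  obtain ⟨h1, h2⟩ := Finset.mem_Ico.mp hj
  rw [arow_getD k j (by omega), arow_getD k (k+1-j) (by omega)]

theorem conv_full (n : ℕ) (hn : 4 ≤ n) :
    ∑ j ∈ Finset.range (n+1), aseq j * aseq (n - j) = aseq n + (n : ℤ) := by
  rw [Finset.sum_range_succ, Nat.sub_self, aseq_zero, mul_zero, add_zero,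
    Finset.range_eq_Ico, Finset.sum_eq_sum_Ico_succ_bot (by omega : 0 < n), aseq_zero, zero_mul,
    zero_add]
  have h := aseq_rec n hn
  linarith

-- ===== power series layer: Y = (1-x)(1-2A) satisfies Y² = Q, hence the P-recurrence for cseq =====

noncomputable def Aps : PowerSeries ℤ := PowerSeries.mk fun n => aseq n
noncomputable def Yps : PowerSeries ℤ := PowerSeries.mk fun n => cseq n
noncomputable def Eps : PowerSeries ℤ := PowerSeries.mk fun n => (n : ℤ)
noncomputable def Rps : PowerSeries ℤ :=
  PowerSeries.C 2 * PowerSeries.X + PowerSeries.C 4 * PowerSeries.X ^ 2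
    + PowerSeries.C 7 * PowerSeries.X ^ 3
noncomputable def Qps : PowerSeries ℤ :=
  1 - PowerSeries.C 6 * PowerSeries.X + PowerSeries.X ^ 2 - PowerSeries.C 4 * PowerSeries.X ^ 3
    + PowerSeries.C 40 * PowerSeries.X ^ 4 - PowerSeries.C 28 * PowerSeries.X ^ 5

theorem coeffXmul (φ : PowerSeries ℤ) (n : ℕ) :
    PowerSeries.coeff n (PowerSeries.X * φ)
      = if 1 ≤ n then PowerSeries.coeff (n-1) φ else 0 := by
  rw [← pow_one (PowerSeries.X : PowerSeries ℤ), PowerSeries.coeff_X_pow_mul']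

theorem Aps_sq : Aps * Aps = Aps + Eps - Rps := by
  apply PowerSeries.ext
  intro n
  rw [PowerSeries.coeff_mul, Finset.Nat.sum_antidiagonal_eq_sum_range_succ_mk]
  simp only [Aps, Eps, Rps, map_sub, map_add, PowerSeries.coeff_mk, PowerSeries.coeff_C_mul,
    PowerSeries.coeff_X, PowerSeries.coeff_X_pow]
  by_cases hn : 4 ≤ n
  · rw [conv_full n hn, if_neg (by omega), if_neg (by omega), if_neg (by omega)]
    ring
  · interval_cases n <;>
      norm_num [Finset.sum_range_succ, aseq_zero, aseq_one, aseq_two, aseq_three]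

theorem Y_eq : Yps = (1 - PowerSeries.X) * (1 - PowerSeries.C 2 * Aps) := by
  have hexp : (1 - PowerSeries.X) * (1 - PowerSeries.C 2 * Aps)
      = 1 - PowerSeries.C 2 * Aps - PowerSeries.X
        + PowerSeries.X * (PowerSeries.C 2 * Aps) := by ring
  apply PowerSeries.ext
  intro n
  rw [hexp]
  simp only [map_sub, map_add, PowerSeries.coeff_one, PowerSeries.coeff_X,
    PowerSeries.coeff_C_mul, coeffXmul, Yps, Aps, PowerSeries.coeff_mk]
  match n with
  | 0 => norm_num [cseq_zero, aseq_zero]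
  | 1 => norm_num [cseq_one, aseq_zero, aseq_one]
  | (k+2) =>
    rw [cseq]
    try simp only [show 2+k-1 = 1+k from by omega]
    try simp only [show k+2-1 = k+1 from by omega]
    split_ifs <;> first | omega | contradiction | ring

theorem E_eq : (1 - PowerSeries.X) ^ 2 * Eps = PowerSeries.X := by
  have hexp : (1 - PowerSeries.X) ^ 2 * Eps
      = Eps - PowerSeries.X * Eps - PowerSeries.X * (Eps - PowerSeries.X * Eps) := by ring
  apply PowerSeries.ext
  intro n
  rw [hexp]
  simp only [map_sub, coeffXmul, Eps, PowerSeries.coeff_mk, PowerSeries.coeff_X]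
  match n with
  | 0 => norm_num
  | 1 => norm_num
  | (k+2) =>
    rw [if_pos (by omega), if_pos (by omega), if_pos (by omega), if_neg (by omega)]
    simp only [show k+2-1 = k+1 by omega, show k+1-1 = k by omega]
    push_cast
    ring

set_option maxHeartbeats 1000000 in
theorem Y_sq : Yps * Yps = Qps := by
  rw [Y_eq]
  have hC2 : (PowerSeries.C (2:ℤ)) = (2 : PowerSeries ℤ) := by simp
  rw [hC2]
  unfold Qps
  have hC6 : (PowerSeries.C (6:ℤ)) = (6 : PowerSeries ℤ) := by simp
  have hC4 : (PowerSeries.C (4:ℤ)) = (4 : PowerSeries ℤ) := by simp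
  have hC40 : (PowerSeries.C (40:ℤ)) = (40 : PowerSeries ℤ) := by simp
  have hC28 : (PowerSeries.C (28:ℤ)) = (28 : PowerSeries ℤ) := by simp
  rw [hC6, hC4, hC40, hC28]
  have hA : Aps * Aps = Aps + Eps - Rps := Aps_sq
  have hR : Rps = 2 * PowerSeries.X + 4 * PowerSeries.X ^ 2 + 7 * PowerSeries.X ^ 3 := by
    unfold Rps
    have hC7 : (PowerSeries.C (7:ℤ)) = (7 : PowerSeries ℤ) := by simp
    rw [hC2, hC4, hC7]
  rw [hR] at hA
  linear_combination (4 * (1 - PowerSeries.X)^2) * hA + 4 * E_eq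

theorem Y_deriv : 2 * Qps * PowerSeries.derivativeFun Yps
    = Yps * PowerSeries.derivativeFun Qps := by
  have h := congrArg PowerSeries.derivativeFun Y_sq
  rw [PowerSeries.derivativeFun_mul] at h
  try simp only [smul_eq_mul] at h
  calc 2 * Qps * PowerSeries.derivativeFun Yps
      = Yps * (Yps * PowerSeries.derivativeFun Yps + Yps * PowerSeries.derivativeFun Yps) := by
        rw [← Y_sq]; ring
    _ = Yps * PowerSeries.derivativeFun Qps := by rw [h]

theorem dQ_eq : PowerSeries.derivativeFun Qps
    = PowerSeries.C (-6) + PowerSeries.C 2 * PowerSeries.X - PowerSeries.C 12 * PowerSeries.X ^ 2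
      + PowerSeries.C 160 * PowerSeries.X ^ 3 - PowerSeries.C 140 * PowerSeries.X ^ 4 := by
  apply PowerSeries.ext
  intro n
  rw [PowerSeries.coeff_derivativeFun]
  simp only [Qps, map_sub, map_add, PowerSeries.coeff_one, PowerSeries.coeff_C_mul,
    PowerSeries.coeff_X, PowerSeries.coeff_X_pow, PowerSeries.coeff_C]
  rcases n with _|_|_|_|_|n
  · norm_num
  · norm_num
  · norm_num
  · norm_num
  · norm_num
  · rw [if_neg (by omega), if_neg (by omega), if_neg (by omega), if_neg (by omega),
      if_neg (by omega), if_neg (by omega), if_neg (by omega), if_neg (by omega),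
      if_neg (by omega), if_neg (by omega), if_neg (by omega)]
    norm_num

theorem coeffQmul (f : PowerSeries ℤ) (m : ℕ) :
    PowerSeries.coeff m (Qps * f)
      = PowerSeries.coeff m f
        - 6 * (if 1 ≤ m then PowerSeries.coeff (m-1) f else 0)
        + (if 2 ≤ m then PowerSeries.coeff (m-2) f else 0)
        - 4 * (if 3 ≤ m then PowerSeries.coeff (m-3) f else 0)
        + 40 * (if 4 ≤ m then PowerSeries.coeff (m-4) f else 0)
        - 28 * (if 5 ≤ m then PowerSeries.coeff (m-5) f else 0) := by
  have hexp : Qps * f = f - PowerSeries.C 6 * (PowerSeries.X * f)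
      + PowerSeries.X ^ 2 * f - PowerSeries.C 4 * (PowerSeries.X ^ 3 * f)
      + PowerSeries.C 40 * (PowerSeries.X ^ 4 * f) - PowerSeries.C 28 * (PowerSeries.X ^ 5 * f) := by
    unfold Qps; ring
  rw [hexp]
  simp only [map_sub, map_add, PowerSeries.coeff_C_mul, coeffXmul, PowerSeries.coeff_X_pow_mul']

theorem coeffdQmul (f : PowerSeries ℤ) (m : ℕ) :
    PowerSeries.coeff m (PowerSeries.derivativeFun Qps * f)
      = -6 * PowerSeries.coeff m f
        + 2 * (if 1 ≤ m then PowerSeries.coeff (m-1) f else 0)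
        - 12 * (if 2 ≤ m then PowerSeries.coeff (m-2) f else 0)
        + 160 * (if 3 ≤ m then PowerSeries.coeff (m-3) f else 0)
        - 140 * (if 4 ≤ m then PowerSeries.coeff (m-4) f else 0) := by
  have hexp : PowerSeries.derivativeFun Qps * f
      = PowerSeries.C (-6) * f + PowerSeries.C 2 * (PowerSeries.X * f)
        - PowerSeries.C 12 * (PowerSeries.X ^ 2 * f)
        + PowerSeries.C 160 * (PowerSeries.X ^ 3 * f)
        - PowerSeries.C 140 * (PowerSeries.X ^ 4 * f) := by
    rw [dQ_eq]; ring
  rw [hexp]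
  simp only [map_sub, map_add, PowerSeries.coeff_C_mul, coeffXmul, PowerSeries.coeff_X_pow_mul']

theorem coeff_dY (k : ℕ) :
    PowerSeries.coeff k (PowerSeries.derivativeFun Yps) = cseq (k+1) * ((k:ℤ)+1) := by
  rw [PowerSeries.coeff_derivativeFun]
  simp [Yps]

-- the P-recurrence for cseq
theorem crec (m : ℕ) (hm : 3 ≤ m) :
    2 * ((m : ℤ) + 1) * cseq (m+1)
      = 6 * (2*(m:ℤ) - 1) * cseq m + (4 - 2*(m:ℤ)) * cseq (m-1)
        + 4 * (2*(m:ℤ) - 7) * cseq (m-2) + 40 * (10 - 2*(m:ℤ)) * cseq (m-3)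
        + (if 4 ≤ m then 28 * (2*(m:ℤ) - 13) * cseq (m-4) else 0) := by
  rcases Nat.lt_or_ge m 5 with hm5 | hm5
  · interval_cases m
    · rw [if_neg (by omega)]
      norm_num [cseq_zero, cseq_one, cseq_two, cseq_three, cseq_four]
    · rw [if_pos (by omega)]
      norm_num [cseq_zero, cseq_one, cseq_two, cseq_three, cseq_four, cseq_five]
  · obtain ⟨k, rfl⟩ : ∃ k, m = k + 5 := ⟨m - 5, by omega⟩
    have h := congrArg (PowerSeries.coeff (k+5)) Y_deriv
    have hC2 : (2 : PowerSeries ℤ) = PowerSeries.C (2:ℤ) := by simp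
    rw [show (2 : PowerSeries ℤ) * Qps * PowerSeries.derivativeFun Yps
        = Qps * (PowerSeries.C (2:ℤ) * PowerSeries.derivativeFun Yps) from by rw [hC2]; ring,
      show Yps * PowerSeries.derivativeFun Qps = PowerSeries.derivativeFun Qps * Yps from
        mul_comm _ _] at h
    rw [coeffQmul, coeffdQmul] at h
    rw [if_pos (by omega), if_pos (by omega), if_pos (by omega), if_pos (by omega),
      if_pos (by omega), if_pos (by omega), if_pos (by omega), if_pos (by omega),
      if_pos (by omega)] at h
    simp only [show k+5-1 = k+4 from by omega, show k+5-2 = k+3 from by omega,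
      show k+5-3 = k+2 from by omega, show k+5-4 = k+1 from by omega,
      show k+5-5 = k from by omega] at h
    simp only [PowerSeries.coeff_C_mul, coeff_dY] at h
    simp only [Yps, PowerSeries.coeff_mk,
      show k+4+1 = k+5 from by omega, show k+3+1 = k+4 from by omega,
      show k+2+1 = k+3 from by omega, show k+1+1 = k+2 from by omega,
      show k+5+1 = k+6 from by omega] at h
    rw [if_pos (by omega)]
    simp only [show k+5-1 = k+4 from by omega, show k+5-2 = k+3 from by omega,
      show k+5-3 = k+2 from by omega, show k+5-4 = k+1 from by omega,
      show k+5+1 = k+6 from by omega]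
    push_cast at h ⊢
    linear_combination h

theorem cseq_eq (k : ℕ) (hk : 2 ≤ k) : cseq k = -2 * (aseq k - aseq (k-1)) := by
  obtain ⟨j, rfl⟩ : ∃ j, k = j + 2 := ⟨k - 2, by omega⟩
  rfl

-- ===== bridges between Python primitives and pure lists =====

theorem pyGetD_nonneg (xs : List Int) (m : Int) (d : Int) (h0 : 0 ≤ m) :
    PySem.List.pyGetD xs m d = xs.getD m.toNat d := by
  simp [PySem.List.pyGetD, PySem.List.pyGet?_of_nonneg, h0, List.getD]

theorem pySetD_nonneg (xs : List Int) (n : Int) (v : Int) (h0 : 0 ≤ n) :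
    PySem.List.pySetD xs n v = xs.set n.toNat v := by
  simp [PySem.List.pySetD_of_nonneg, h0]

theorem pyGetD_pySetD_int (xs : List Int) (n m : Int) (v d : Int) (hn0 : 0 ≤ n) (hm0 : 0 ≤ m) :
    PySem.List.pyGetD (PySem.List.pySetD xs n v) m d
      = if m = n ∧ n < (xs.length : Int) then v else PySem.List.pyGetD xs m d := by
  rw [pySetD_nonneg _ _ _ hn0, pyGetD_nonneg _ _ _ hm0]
  by_cases hc : m = n ∧ n < (xs.length : Int)
  · rw [if_pos hc]
    obtain ⟨he, hlt⟩ := hc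
    subst he
    simp [List.getD, show m.toNat < xs.length by omega]
  · rw [if_neg hc, pyGetD_nonneg _ _ _ hm0, List.getD, List.getD, List.getElem?_set]
    by_cases he : n.toNat = m.toNat
    · have hmn : m = n := by omega
      have hge : xs.length ≤ m.toNat := by
        rcases (not_and_or.mp hc) with h | h
        · exact absurd hmn h
        · omega
      rw [if_pos he]
      simp [show ¬ n.toNat < xs.length by omega,
        List.getElem?_eq_none (by omega : xs.length ≤ m.toNat)]
    · rw [if_neg he]

theorem set_getD_self (xs : List Int) (n : Nat) (hn : n < xs.length) (d : Int) :
    xs.set n (xs.getD n d) = xs := by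
  rw [List.getD_eq_getElem xs d hn]
  exact List.set_getElem_self hn

theorem sum_map_pyRange (g : Int → Int) (a : Int) :
    ∀ (N : Nat) (b : Int), (b - a).toNat = N →
      ((PySem.List.pyRange a b 1).map g).sum = ∑ j ∈ Finset.Ico a b, g j := by
  intro N
  induction N with
  | zero =>
    intro b hb
    rw [PySem.List.pyRange_one_eq_nil (by omega), Finset.Ico_eq_empty (by omega : ¬ a < b)]
    simp
  | succ N ih =>
    intro b hb
    have hab : a ≤ b - 1 := by omega
    have h1 : b - 1 + 1 = b := by ring
    rw [← h1, PySem.List.pyRange_one_succ_right hab, List.map_append, List.sum_append,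
      ih (b - 1) (by omega), ← Finset.sum_Ico_add_eq_sum_Ico_add_one hab g]
    simp

theorem foldl_sum_Ico (g : Int → Int) (a b c : Int) :
    (PySem.List.pyRange a b 1).foldl (fun s j => s + g j) c = c + ∑ j ∈ Finset.Ico a b, g j := by
  rw [PySem.List.foldl_add, sum_map_pyRange g a (b - a).toNat b rfl]

-- A's in-place accumulation into dp[i] only reads indices ≠ i, so it is the pure sum over the original dp
theorem innerA (dp : List Int) (i : Int) (hi : 0 < i) (hlen : i < (dp.length : Int))
    (js : List Int) (hjs : ∀ j ∈ js, 1 ≤ j ∧ j < i) (x : Int) :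
    js.foldl (fun d j =>
        PySem.List.pySetD d i
          (PySem.List.pyGetD d i 0 + PySem.List.pyGetD d j 0 * PySem.List.pyGetD d (i - j) 0))
      (PySem.List.pySetD dp i x)
    = PySem.List.pySetD dp i
        (js.foldl (fun s j => s + PySem.List.pyGetD dp j 0 * PySem.List.pyGetD dp (i - j) 0) x) := by
  induction js generalizing x with
  | nil => rfl
  | cons j t ih =>
    have hj := hjs j (by simp)
    simp only [List.foldl_cons]
    rw [pyGetD_pySetD_int dp i i x 0 (by omega) (by omega),
      if_pos ⟨rfl, hlen⟩,
      pyGetD_pySetD_int dp i j x 0 (by omega) (by omega),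
      if_neg (by rintro ⟨h1, -⟩; omega),
      pyGetD_pySetD_int dp i (i - j) x 0 (by omega) (by omega),
      if_neg (by rintro ⟨h1, -⟩; omega)]
    rw [pySetD_nonneg _ _ _ (by omega : (0:Int) ≤ i), pySetD_nonneg _ _ _ (by omega : (0:Int) ≤ i),
      List.set_set, ← pySetD_nonneg _ _ _ (by omega : (0:Int) ≤ i)]
    exact ih (fun y hy => hjs y (by simp [hy])) _

-- reindexing an ℤ-interval convolution sum to the ℕ-interval sum
theorem sum_Ico_int_nat (g : ℕ → ℤ) (i : ℤ) (hi : 0 ≤ i) :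
    ∑ j ∈ Finset.Ico (1:ℤ) i, g j.toNat * g (i - j).toNat
      = ∑ j ∈ Finset.Ico 1 i.toNat, g j * g (i.toNat - j) := by
  refine Finset.sum_nbij' (fun j => j.toNat) (fun j => (j : ℤ)) ?_ ?_ ?_ ?_ ?_
  · intro x hx; beta_reduce; simp only [Finset.mem_Ico] at hx ⊢; omega
  · intro x hx; beta_reduce; simp only [Finset.mem_Ico] at hx ⊢; omega
  · intro x hx; beta_reduce; simp only [Finset.mem_Ico] at hx; omega
  · intro x hx; beta_reduce; simp only [Finset.mem_Ico] at hx; omega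
  · intro x hx
    beta_reduce
    simp only [Finset.mem_Ico] at hx
    congr 2
    omega

theorem getD_map_range (f : ℕ → ℤ) (L t : ℕ) :
    ((List.range L).map f).getD t 0 = if t < L then f t else 0 := by
  by_cases h : t < L
  · rw [List.getD_eq_getElem _ _ (by simpa using h)]
    simp [h]
  · rw [List.getD_eq_default _ _ (by simpa using h)]
    simp [h]

-- ===== the A-side loop computes aseq =====

def InvA (n : Int) (i : Int) (dp : List Int) : Prop :=
  dp.length = (n + 1).toNat ∧
    ∀ m : ℕ, m < dp.length → dp.getD m 0 = if (m : ℤ) < i then aseq m else 0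

theorem loopA (n : Int) (hn : 3 ≤ n) :
    ∀ (N : ℕ) (i : Int), 4 ≤ i → i ≤ n + 1 → N = (n + 1 - i).toNat →
      ∀ dp : List Int, InvA n i dp →
      InvA n (n+1) ((PySem.List.pyRange i (n + 1) 1).foldl (fun dp i =>
        let dp := (PySem.List.pyRange 1 i 1).foldl (fun dp j =>
            let k := i - j
            PySem.List.pySetD dp i
              (PySem.List.pyGetD dp i 0 + PySem.List.pyGetD dp j 0 * PySem.List.pyGetD dp k 0)) dp
        PySem.List.pySetD dp i (PySem.List.pyGetD dp i 0 - i)) dp) := by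
  intro N
  induction N with
  | zero =>
    intro i h4 hle hN dp hinv
    have hi : i = n + 1 := by omega
    rw [PySem.List.pyRange_one_eq_nil (by omega)]
    subst hi
    exact hinv
  | succ N ih =>
    intro i h4 hle hN dp hinv
    obtain ⟨hlen, hval⟩ := hinv
    have hl : ((n+1).toNat : ℤ) = n + 1 := by omega
    have hilen : i < (dp.length : ℤ) := by rw [hlen]; omega
    have hlt : i < n + 1 := by omega
    rw [PySem.List.pyRange_one_cons hlt, List.foldl_cons]
    have hiz : PySem.List.pyGetD dp i 0 = 0 := by
      rw [pyGetD_nonneg _ _ _ (by omega), hval i.toNat (by omega), if_neg (by omega)]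
    have hdp0 : dp = PySem.List.pySetD dp i (PySem.List.pyGetD dp i 0) := by
      rw [pySetD_nonneg _ _ _ (by omega), pyGetD_nonneg _ _ _ (by omega),
        set_getD_self dp i.toNat (by omega) 0]
    have hstep : (let dp' := (PySem.List.pyRange 1 i 1).foldl (fun dp j =>
            let k := i - j
            PySem.List.pySetD dp i
              (PySem.List.pyGetD dp i 0 + PySem.List.pyGetD dp j 0 * PySem.List.pyGetD dp k 0)) dp
          PySem.List.pySetD dp' i (PySem.List.pyGetD dp' i 0 - i))
        = PySem.List.pySetD dp i (aseq i.toNat) := by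
      have hA : (PySem.List.pyRange 1 i 1).foldl (fun dp j =>
            let k := i - j
            PySem.List.pySetD dp i
              (PySem.List.pyGetD dp i 0 + PySem.List.pyGetD dp j 0 * PySem.List.pyGetD dp k 0)) dp
          = PySem.List.pySetD dp i
              (∑ j ∈ Finset.Ico (1 : Int) i,
                PySem.List.pyGetD dp j 0 * PySem.List.pyGetD dp (i - j) 0) := by
        conv_lhs => rw [hdp0]
        rw [innerA dp i (by omega) hilen (PySem.List.pyRange 1 i 1)
          (fun j hj => by
            rw [PySem.List.mem_pyRange_one] at hj
            exact ⟨hj.1, hj.2⟩) (PySem.List.pyGetD dp i 0)]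
        rw [foldl_sum_Ico, hiz, zero_add]
      have hsum : ∑ j ∈ Finset.Ico (1 : Int) i,
            PySem.List.pyGetD dp j 0 * PySem.List.pyGetD dp (i - j) 0
          = aseq i.toNat + i := by
        have h1 : ∑ j ∈ Finset.Ico (1 : Int) i,
              PySem.List.pyGetD dp j 0 * PySem.List.pyGetD dp (i - j) 0
            = ∑ j ∈ Finset.Ico (1 : Int) i, aseq j.toNat * aseq (i - j).toNat := by
          refine Finset.sum_congr rfl fun j hj => ?_
          obtain ⟨hj1, hj2⟩ := Finset.mem_Ico.mp hj
          rw [pyGetD_nonneg _ _ _ (by omega), pyGetD_nonneg _ _ _ (by omega),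
            hval j.toNat (by omega), hval (i - j).toNat (by omega),
            if_pos (by omega), if_pos (by omega)]
        rw [h1, sum_Ico_int_nat aseq i (by omega)]
        have h2 := aseq_rec i.toNat (by omega)
        have h3 : ((i.toNat : ℕ) : ℤ) = i := by omega
        rw [h3] at h2
        linarith
      simp only [hA]
      rw [pyGetD_pySetD_int dp i i _ 0 (by omega) (by omega), if_pos ⟨rfl, hilen⟩,
        pySetD_nonneg _ _ _ (by omega : (0:Int) ≤ i), pySetD_nonneg _ _ _ (by omega : (0:Int) ≤ i),
        List.set_set, ← pySetD_nonneg _ _ _ (by omega : (0:Int) ≤ i), hsum]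
      congr 1
      ring
    simp only [] at hstep ⊢
    rw [hstep]
    apply ih (i+1) (by omega) (by omega) (by omega)
    constructor
    · rw [pySetD_nonneg _ _ _ (by omega), List.length_set, hlen]
    · intro m hm
      rw [pySetD_nonneg _ _ _ (by omega)] at hm ⊢
      rw [List.length_set] at hm
      rw [List.getD, List.getElem?_set]
      by_cases he : i.toNat = m
      · rw [if_pos he, if_pos (show i.toNat < dp.length by omega), if_pos (by omega)]
        simp only [Option.getD_some]
        exact congrArg aseq (by omega)
      · rw [if_neg he, ← List.getD, hval m hm]
        by_cases hmi : (m : ℤ) < i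
        · rw [if_pos hmi, if_pos (by omega)]
        · rw [if_neg hmi, if_neg (by omega)]

-- ===== the B-side loop computes cseq/aseq =====

theorem loopB (n : Int) (hn : 3 ≤ n) :
    ∀ (N : ℕ) (i : Int), 4 ≤ i → i ≤ n + 1 → N = (n + 1 - i).toNat →
      ((PySem.List.pyRange i (n + 1) 1).foldl (fun (st : List Int × Int) i =>
        let c := st.1
        let a := st.2
        let m := i - 1
        let rhs := 6 * (2 * m - 1) * PySem.List.pyGetD c m 0
          + (4 - 2 * m) * PySem.List.pyGetD c (m - 1) 0
          + 4 * (2 * m - 7) * PySem.List.pyGetD c (m - 2) 0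
          + 40 * (10 - 2 * m) * PySem.List.pyGetD c (m - 3) 0
          + (if 4 ≤ m then 28 * (2 * m - 13) * PySem.List.pyGetD c (m - 4) 0 else 0)
        let ci := PySem.Int.floordiv rhs (2 * (m + 1))
        (c ++ [ci], a - PySem.Int.floordiv ci 2))
        ((List.range i.toNat).map (fun m => cseq m), aseq (i.toNat - 1))).2
      = aseq n.toNat := by
  intro N
  induction N with
  | zero =>
    intro i h4 hle hN
    have hi : i = n + 1 := by omega
    rw [PySem.List.pyRange_one_eq_nil (by omega)]
    subst hi
    simp only [List.foldl_nil]
    congr 1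
    omega
  | succ N ih =>
    intro i h4 hle hN
    have hlt : i < n + 1 := by omega
    rw [PySem.List.pyRange_one_cons hlt, List.foldl_cons]
    set M : ℕ := (i - 1).toNat with hM
    have hM3 : 3 ≤ M := by omega
    have hMi : ((M : ℤ)) = i - 1 := by omega
    have hgets : ∀ (e : ℤ), 0 ≤ e → e < i →
        PySem.List.pyGetD ((List.range i.toNat).map (fun m => cseq m)) e 0 = cseq e.toNat := by
      intro e he0 hei
      rw [pyGetD_nonneg _ _ _ he0, getD_map_range, if_pos (by omega)]
    have hrhs : 6 * (2 * (i-1) - 1) * PySem.List.pyGetD ((List.range i.toNat).map (fun m => cseq m)) (i-1) 0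
          + (4 - 2 * (i-1)) * PySem.List.pyGetD ((List.range i.toNat).map (fun m => cseq m)) ((i-1) - 1) 0
          + 4 * (2 * (i-1) - 7) * PySem.List.pyGetD ((List.range i.toNat).map (fun m => cseq m)) ((i-1) - 2) 0
          + 40 * (10 - 2 * (i-1)) * PySem.List.pyGetD ((List.range i.toNat).map (fun m => cseq m)) ((i-1) - 3) 0
          + (if 4 ≤ (i-1) then 28 * (2 * (i-1) - 13) * PySem.List.pyGetD ((List.range i.toNat).map (fun m => cseq m)) ((i-1) - 4) 0 else 0)
        = 2 * i * cseq i.toNat := by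
      rw [hgets (i-1) (by omega) (by omega), hgets ((i-1)-1) (by omega) (by omega),
        hgets ((i-1)-2) (by omega) (by omega), hgets ((i-1)-3) (by omega) (by omega)]
      have hcre := crec M hM3
      have e0 : (i-1).toNat = M := rfl
      have e1 : ((i-1)-1).toNat = M - 1 := by omega
      have e2 : ((i-1)-2).toNat = M - 2 := by omega
      have e3 : ((i-1)-3).toNat = M - 3 := by omega
      have e5 : M + 1 = i.toNat := by omega
      rw [e0, e1, e2, e3]
      by_cases h44 : 4 ≤ i - 1
      · rw [if_pos h44, hgets ((i-1)-4) (by omega) (by omega),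
          show ((i-1)-4).toNat = M - 4 from by omega]
        rw [if_pos (by omega : 4 ≤ M)] at hcre
        rw [← hMi, show i = (M:ℤ)+1 from by omega,
          show (((M:ℤ)+1)).toNat = M + 1 from by omega, hcre]
      · rw [if_neg h44]
        rw [if_neg (by omega : ¬ 4 ≤ M)] at hcre
        rw [← hMi, show i = (M:ℤ)+1 from by omega,
          show (((M:ℤ)+1)).toNat = M + 1 from by omega, hcre]
    simp only [hrhs]
    have hci : PySem.Int.floordiv (2 * i * cseq i.toNat) (2 * ((i-1) + 1)) = cseq i.toNat := by
      rw [show (i - 1) + 1 = i from by ring, PySem.Int.floordiv_eq_ediv_of_pos (by omega),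
        Int.mul_ediv_cancel_left _ (by omega : (2*i) ≠ 0)]
    rw [hci]
    have hcl : (List.range i.toNat).map (fun m => cseq m) ++ [cseq i.toNat]
        = (List.range (i+1).toNat).map (fun m => cseq m) := by
      rw [show (i+1).toNat = i.toNat + 1 from by omega, List.range_succ, List.map_append]
      simp
    have hca : aseq (i.toNat - 1) - PySem.Int.floordiv (cseq i.toNat) 2 = aseq ((i+1).toNat - 1) := by
      rw [cseq_eq i.toNat (by omega), PySem.Int.floordiv_eq_ediv_of_pos (by omega),
        show (-2 * (aseq i.toNat - aseq (i.toNat - 1))) = 2 * (-(aseq i.toNat - aseq (i.toNat - 1))) from by ring,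
        Int.mul_ediv_cancel_left _ (by omega : (2:ℤ) ≠ 0),
        show (i+1).toNat - 1 = i.toNat from by omega]
      ring
    rw [hcl, hca]
    exact ih (i+1) (by omega) (by omega) (by omega)

-- ===== VERDICT (by name: the statement is the Claim_ definition above) =====
theorem solution_spec : Claim_equal_solution := by
  intro n hdom hpre
  have hn : 3 ≤ n := hpre
  unfold Spec_solution solution solution_alt
  simp only []
  -- A side
  have hlenr : (List.replicate (n + 1).toNat (0 : Int)).length = (n + 1).toNat :=
    List.length_replicate
  have hinv0 : InvA n 4 (PySem.List.pySetD (PySem.List.pySetD (PySem.List.pySetD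
      (List.replicate (n + 1).toNat (0 : Int)) 1 1) 2 3) 3 10) := by
    constructor
    · rw [pySetD_nonneg _ _ _ (by norm_num), pySetD_nonneg _ _ _ (by norm_num),
        pySetD_nonneg _ _ _ (by norm_num)]
      simp
    · intro m hm
      have hm' : m < (n+1).toNat := by
        rw [pySetD_nonneg _ _ _ (by norm_num), pySetD_nonneg _ _ _ (by norm_num),
          pySetD_nonneg _ _ _ (by norm_num)] at hm
        simpa using hm
      have hlen2 : (PySem.List.pySetD (PySem.List.pySetD
          (List.replicate (n + 1).toNat (0 : Int)) 1 1) 2 3).length = (n + 1).toNat := by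
        rw [pySetD_nonneg _ _ _ (by norm_num), pySetD_nonneg _ _ _ (by norm_num)]
        simp
      have hlen1 : (PySem.List.pySetD
          (List.replicate (n + 1).toNat (0 : Int)) 1 1).length = (n + 1).toNat := by
        rw [pySetD_nonneg _ _ _ (by norm_num)]
        simp
      rw [← PySem.List.pyGetD_natCast (d := (0:ℤ)),
        pyGetD_pySetD_int _ _ _ _ _ (by norm_num) (by omega),
        pyGetD_pySetD_int _ _ _ _ _ (by norm_num) (by omega),
        pyGetD_pySetD_int _ _ _ _ _ (by norm_num) (by omega),
        pyGetD_nonneg _ _ _ (by omega), hlen2, hlen1, hlenr]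
      by_cases h3 : (m:ℤ) = 3
      · rw [if_pos ⟨h3, by omega⟩, if_pos (by omega)]
        rw [show m = 3 from by omega, aseq_three]
      · rw [if_neg (by rintro ⟨h,-⟩; exact h3 h)]
        by_cases h2 : (m:ℤ) = 2
        · rw [if_pos ⟨h2, by omega⟩, if_pos (by omega), show m = 2 from by omega, aseq_two]
        · rw [if_neg (by rintro ⟨h,-⟩; exact h2 h)]
          by_cases h1 : (m:ℤ) = 1
          · rw [if_pos ⟨h1, by omega⟩, if_pos (by omega), show m = 1 from by omega, aseq_one]
          · rw [if_neg (by rintro ⟨h,-⟩; exact h1 h)]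
            rw [show ((m:ℤ)).toNat = m from by omega,
              List.getD_eq_getElem _ _ (by simpa using hm')]
            simp only [List.getElem_replicate]
            by_cases h0 : (m:ℤ) < 4
            · rw [if_pos h0, show m = 0 from by omega, aseq_zero]
            · rw [if_neg h0]
  have hA := loopA n hn (n - 3).toNat 4 (by omega) (by omega) (by omega) _ hinv0
  obtain ⟨hlenf, hvalf⟩ := hA
  rw [pyGetD_nonneg _ _ _ (by omega), hvalf n.toNat (by omega), if_pos (by omega)]
  -- B side
  have hB := loopB n hn (n - 3).toNat 4 (by omega) (by omega) (by omega)
  have hc0 : (List.range (4:ℤ).toNat).map (fun m => cseq m) = [1, -3, -4, -14] := by decide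
  have ha0 : aseq ((4:ℤ).toNat - 1) = 10 := aseq_three
  rw [hc0, ha0] at hB
  exact hB.symm
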